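-- pv_equiv track=rewrite | github.com/GarvChopra/problem-map-AI- | ai_engine.py | find_authority_for_issue
-- ===== SOURCE A (Python) =====
-- AUTHORITY_BY_TAG = {
--     'pothole':     'PWD Delhi (Roads)',
--     'water':       'Delhi Jal Board (Helpline)',
--     'sewage':      'Delhi Jal Board (Helpline)',
--     'garbage':     'MCD',     # zone-specific resolved at runtime
--     'streetlight': 'NDMC',    # zone-specific resolved at runtime
--     'traffic':     'Delhi Traffic Police',
--     'electricity': 'BSES',    # zone-specific resolved at runtime
--     'noise':       'Environment Dept Delhi',
--     'tree':        'Forest Dept Delhi',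
--     'other':       'Delhi Citizen Helpline',
-- }
--
-- def _resolve_zone_authority(tag, area):
--     """Pick the right MCD / BSES variant based on Delhi zone."""
--     a = (area or '').lower()
--     NORTH = {'rohini','pitampura','model town','shalimar bagh','burari','narela',
--              'bawana','alipur','mukherjee nagar','gtb nagar','adarsh nagar',
--              'ashok vihar','wazirabad','bhalswa','kamla nagar','civil lines'}
--     SOUTH = {'saket','vasant kunj','mehrauli','malviya nagar','hauz khas',
--              'greater kailash','lajpat nagar','kalkaji','tughlakabad','okhla',
--              'badarpur','sangam vihar','govindpuri','sarita vihar','jasola',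
--              'munirka','rk puram','vasant vihar','chirag delhi','pushp vihar','deoli'}
--     EAST  = {'laxmi nagar','preet vihar','shahdara','geeta colony','mayur vihar',
--              'patparganj','seelampur','welcome','mustafabad','bhajanpura',
--              'vishwas nagar','pandav nagar','mandawali','anand vihar','karkardooma',
--              'dilshad garden','jhilmil','vivek vihar','yamuna vihar','karawal nagar',
--              'nand nagri','brahmpuri','gokulpuri','jaffrabad','maujpur','khajuri khas'}
--     if tag == 'garbage':
--         if any(z in a for z in NORTH): return 'MCD North Delhi'
--         if any(z in a for z in SOUTH): return 'MCD South Delhi'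
--         if any(z in a for z in EAST):  return 'MCD East Delhi'
--         return 'MCD South Delhi'
--     if tag == 'electricity':
--         if any(z in a for z in EAST): return 'BSES Yamuna'
--         return 'BSES Rajdhani'
--     if tag == 'streetlight':
--         if 'connaught' in a or 'central' in a: return 'NDMC (New Delhi)'
--         # streetlight outside NDMC zone → MCD
--         if any(z in a for z in NORTH): return 'MCD North Delhi'
--         if any(z in a for z in EAST):  return 'MCD East Delhi'
--         return 'MCD South Delhi'
--     return AUTHORITY_BY_TAG.get(tag, 'Delhi Citizen Helpline')
--
-- def find_authority_for_issue(issue, gov_agencies):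
--     """Match an issue to the most appropriate government agency.
--     Returns the agency dict, or None if no match."""
--     if not issue or not gov_agencies:
--         return None
--     tag = issue.get('tag') or 'other'
--     area = issue.get('area') or ''
--     target_name = _resolve_zone_authority(tag, area)
--
--     # First try exact name match
--     for ag in gov_agencies:
--         if ag.get('name') == target_name:
--             return ag
--     # Loose match (e.g. target=MCD South Delhi → MCD anything)
--     for ag in gov_agencies:
--         if (target_name.split()[0] in (ag.get('name') or '')
--                 and ag.get('tag') == tag):
--             return ag
--     # Fallback: any agency matching the tag
--     for ag in gov_agencies:
--         if ag.get('tag') == tag: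
--             return ag
--     # Last resort: general helpline
--     for ag in gov_agencies:
--         if ag.get('tag') == 'other':
--             return ag
--     return gov_agencies[0] if gov_agencies else None
-- ===== SOURCE B (Python) =====
-- AUTHORITY_BY_TAG = {
--     'pothole':     'PWD Delhi (Roads)',
--     'water':       'Delhi Jal Board (Helpline)',
--     'sewage':      'Delhi Jal Board (Helpline)',
--     'garbage':     'MCD',     # zone-specific resolved at runtime
--     'streetlight': 'NDMC',    # zone-specific resolved at runtime
--     'traffic':     'Delhi Traffic Police',
--     'electricity': 'BSES',    # zone-specific resolved at runtime
--     'noise':       'Environment Dept Delhi',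
--     'tree':        'Forest Dept Delhi',
--     'other':       'Delhi Citizen Helpline',
-- }
--
-- def _resolve_zone_authority(tag, area):
--     """Pick the right MCD / BSES variant based on Delhi zone."""
--     a = (area or '').lower()
--     NORTH = {'rohini','pitampura','model town','shalimar bagh','burari','narela',
--              'bawana','alipur','mukherjee nagar','gtb nagar','adarsh nagar',
--              'ashok vihar','wazirabad','bhalswa','kamla nagar','civil lines'}
--     SOUTH = {'saket','vasant kunj','mehrauli','malviya nagar','hauz khas',
--              'greater kailash','lajpat nagar','kalkaji','tughlakabad','okhla',
--              'badarpur','sangam vihar','govindpuri','sarita vihar','jasola',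
--              'munirka','rk puram','vasant vihar','chirag delhi','pushp vihar','deoli'}
--     EAST  = {'laxmi nagar','preet vihar','shahdara','geeta colony','mayur vihar',
--              'patparganj','seelampur','welcome','mustafabad','bhajanpura',
--              'vishwas nagar','pandav nagar','mandawali','anand vihar','karkardooma',
--              'dilshad garden','jhilmil','vivek vihar','yamuna vihar','karawal nagar',
--              'nand nagri','brahmpuri','gokulpuri','jaffrabad','maujpur','khajuri khas'}
--     if tag == 'garbage':
--         if any(z in a for z in NORTH): return 'MCD North Delhi'
--         if any(z in a for z in SOUTH): return 'MCD South Delhi'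
--         if any(z in a for z in EAST):  return 'MCD East Delhi'
--         return 'MCD South Delhi'
--     if tag == 'electricity':
--         if any(z in a for z in EAST): return 'BSES Yamuna'
--         return 'BSES Rajdhani'
--     if tag == 'streetlight':
--         if 'connaught' in a or 'central' in a: return 'NDMC (New Delhi)'
--         if any(z in a for z in NORTH): return 'MCD North Delhi'
--         if any(z in a for z in EAST):  return 'MCD East Delhi'
--         return 'MCD South Delhi'
--     return AUTHORITY_BY_TAG.get(tag, 'Delhi Citizen Helpline')
--
-- def find_authority_for_issue(issue, gov_agencies):
--     """Match an issue to the most appropriate agency: score every agency with a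
--     priority rank (0 exact name, 1 loose name+tag, 2 tag, 3 'other', 4 none)
--     and keep the first agency attaining the best rank seen."""
--     if not issue or not gov_agencies:
--         return None
--     tag = issue.get('tag') or 'other'
--     area = issue.get('area') or ''
--     target_name = _resolve_zone_authority(tag, area)
--     head = target_name.split()[0]
--
--     def rank(ag):
--         if ag.get('name') == target_name:
--             return 0
--         if head in (ag.get('name') or '') and ag.get('tag') == tag:
--             return 1
--         if ag.get('tag') == tag:
--             return 2
--         if ag.get('tag') == 'other':
--             return 3
--         return 4
--
--     best, best_rank = None, 5
--     for ag in gov_agencies: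
--         r = rank(ag)
--         if r < best_rank:
--             best, best_rank = ag, r
--     return best
-- ===== Notes on version B (the rewrite author's own statement) =====
-- stated objective: alternative
-- what changed: A's four sequential early-return scans over gov_agencies (exact name, loose name+tag, tag, 'other') are replaced by a rank-and-select scheme: every agency is scored once with a priority rank 0-4 and a single loop keeps the first agency attaining the minimal rank (the all-rank-4 case yields gov_agencies[0], A's positional fallback).
import Mathlib
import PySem

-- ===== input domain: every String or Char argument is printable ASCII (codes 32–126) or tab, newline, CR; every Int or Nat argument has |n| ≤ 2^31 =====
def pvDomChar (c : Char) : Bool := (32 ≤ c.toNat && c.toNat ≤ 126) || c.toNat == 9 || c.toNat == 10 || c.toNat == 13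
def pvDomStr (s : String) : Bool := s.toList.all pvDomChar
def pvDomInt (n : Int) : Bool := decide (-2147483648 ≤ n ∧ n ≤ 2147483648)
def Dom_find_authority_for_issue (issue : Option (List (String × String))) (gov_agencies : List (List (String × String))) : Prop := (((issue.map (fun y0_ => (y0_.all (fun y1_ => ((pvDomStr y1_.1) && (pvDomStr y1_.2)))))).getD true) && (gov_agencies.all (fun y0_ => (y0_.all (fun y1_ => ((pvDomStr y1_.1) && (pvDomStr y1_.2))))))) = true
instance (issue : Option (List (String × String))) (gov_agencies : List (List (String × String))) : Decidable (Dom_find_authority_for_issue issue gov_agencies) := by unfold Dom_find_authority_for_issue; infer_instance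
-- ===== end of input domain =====

-- B replaces A's four sequential early-return scans of gov_agencies by a rank-and-select
-- scheme: each agency gets a priority rank 0..4 and one loop keeps the first agency with
-- the minimal rank (objective: alternative decomposition, same asymptotic cost).
-- The helper _resolve_zone_authority is identical in A's and B's Python and is shared below.

-- ===== PORT A =====
def AUTHORITY_BY_TAG : PySem.Dict String String := PySem.Dict.mk
  [("pothole", "PWD Delhi (Roads)"), ("water", "Delhi Jal Board (Helpline)"),
   ("sewage", "Delhi Jal Board (Helpline)"), ("garbage", "MCD"), ("streetlight", "NDMC"),
   ("traffic", "Delhi Traffic Police"), ("electricity", "BSES"),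
   ("noise", "Environment Dept Delhi"), ("tree", "Forest Dept Delhi"),
   ("other", "Delhi Citizen Helpline")]

-- the zone sets are iterated only through order-independent `any(z in a …)`, so a list is exact
def zoneNORTH : List String :=
  ["rohini","pitampura","model town","shalimar bagh","burari","narela",
   "bawana","alipur","mukherjee nagar","gtb nagar","adarsh nagar",
   "ashok vihar","wazirabad","bhalswa","kamla nagar","civil lines"]
def zoneSOUTH : List String :=
  ["saket","vasant kunj","mehrauli","malviya nagar","hauz khas",
   "greater kailash","lajpat nagar","kalkaji","tughlakabad","okhla",
   "badarpur","sangam vihar","govindpuri","sarita vihar","jasola",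
   "munirka","rk puram","vasant vihar","chirag delhi","pushp vihar","deoli"]
def zoneEAST : List String :=
  ["laxmi nagar","preet vihar","shahdara","geeta colony","mayur vihar",
   "patparganj","seelampur","welcome","mustafabad","bhajanpura",
   "vishwas nagar","pandav nagar","mandawali","anand vihar","karkardooma",
   "dilshad garden","jhilmil","vivek vihar","yamuna vihar","karawal nagar",
   "nand nagri","brahmpuri","gokulpuri","jaffrabad","maujpur","khajuri khas"]

def resolve_zone_authority (tag : String) (area : String) : String :=
  let a := PySem.Str.lower area   -- (area or '').lower(); area is a string, '' stays ''
  if tag = "garbage" then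
    if zoneNORTH.any (fun z => PySem.Str.isIn z a) then "MCD North Delhi"
    else if zoneSOUTH.any (fun z => PySem.Str.isIn z a) then "MCD South Delhi"
    else if zoneEAST.any (fun z => PySem.Str.isIn z a) then "MCD East Delhi"
    else "MCD South Delhi"
  else if tag = "electricity" then
    if zoneEAST.any (fun z => PySem.Str.isIn z a) then "BSES Yamuna" else "BSES Rajdhani"
  else if tag = "streetlight" then
    if PySem.Str.isIn "connaught" a || PySem.Str.isIn "central" a then "NDMC (New Delhi)"
    else if zoneNORTH.any (fun z => PySem.Str.isIn z a) then "MCD North Delhi"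
    else if zoneEAST.any (fun z => PySem.Str.isIn z a) then "MCD East Delhi"
    else "MCD South Delhi"
  else (PySem.Dict.get? AUTHORITY_BY_TAG tag).getD "Delhi Citizen Helpline"

-- A-side: `issue.get('tag') or 'other'` (None and '' are both falsy)
def getOrDefault (d : List (String × String)) (k : String) (dflt : String) : String :=
  let s := (PySem.Dict.get? (PySem.Dict.mk d) k).getD ""
  if s = "" then dflt else s

-- A's four match predicates, in A's order
def pExact (target : String) (ag : List (String × String)) : Bool :=
  PySem.Dict.get? (PySem.Dict.mk ag) "name" == some target
def pLoose (target tag : String) (ag : List (String × String)) : Bool :=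
  -- target_name.split()[0]: every resolve_zone_authority result is a nonempty literal, so [0] is exact
  PySem.Str.isIn ((PySem.Str.split₀ target).headD "") ((PySem.Dict.get? (PySem.Dict.mk ag) "name").getD "")
    && (PySem.Dict.get? (PySem.Dict.mk ag) "tag" == some tag)
def pTag (tag : String) (ag : List (String × String)) : Bool :=
  PySem.Dict.get? (PySem.Dict.mk ag) "tag" == some tag
def pOther (ag : List (String × String)) : Bool :=
  PySem.Dict.get? (PySem.Dict.mk ag) "tag" == some "other"

def find_authority_for_issue (issue : Option (List (String × String))) (gov_agencies : List (List (String × String))) : Option (List (String × String)) :=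
  match issue with
  | none => none                                  -- `not issue`
  | some d =>
    if d = [] ∨ gov_agencies = [] then none       -- `not issue or not gov_agencies`
    else
      let tag := getOrDefault d "tag" "other"
      let area := getOrDefault d "area" ""
      let target := resolve_zone_authority tag area
      match gov_agencies.find? (pExact target) with        -- first loop: exact name match
      | some ag => some ag
      | none =>
        match gov_agencies.find? (pLoose target tag) with  -- second loop: loose match
        | some ag => some ag
        | none =>
          match gov_agencies.find? (pTag tag) with          -- third loop: any agency with the tag
          | some ag => some ag
          | none =>
            match gov_agencies.find? pOther with            -- fourth loop: general helpline
            | some ag => some ag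
            | none => gov_agencies.head?                    -- gov_agencies[0] if gov_agencies else None

-- ===== PORT B =====
-- Source B's nested `rank(ag)`: priority 0 = exact name, 1 = loose name + tag, 2 = tag, 3 = 'other', 4 = no match
def rankOf (target tag : String) (ag : List (String × String)) : Nat :=
  if PySem.Dict.get? (PySem.Dict.mk ag) "name" == some target then 0
  else if PySem.Str.isIn ((PySem.Str.split₀ target).headD "")
            ((PySem.Dict.get? (PySem.Dict.mk ag) "name").getD "")
          && (PySem.Dict.get? (PySem.Dict.mk ag) "tag" == some tag) then 1
  else if PySem.Dict.get? (PySem.Dict.mk ag) "tag" == some tag then 2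
  else if PySem.Dict.get? (PySem.Dict.mk ag) "tag" == some "other" then 3
  else 4

def find_authority_for_issue_alt (issue : Option (List (String × String))) (gov_agencies : List (List (String × String))) : Option (List (String × String)) :=
  match issue with
  | none => none
  | some d =>
    if d.isEmpty || gov_agencies.isEmpty then none
    else
      let tagv := (PySem.Dict.get? (PySem.Dict.mk d) "tag").getD ""
      let tag := if tagv = "" then "other" else tagv
      let areav := (PySem.Dict.get? (PySem.Dict.mk d) "area").getD ""
      let area := if areav = "" then "" else areav
      let target := resolve_zone_authority tag area
      -- best, best_rank = None, 5; one loop keeping the first agency of minimal rank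
      (gov_agencies.foldl
        (fun st ag => let r := rankOf target tag ag; if r < st.2 then (some ag, r) else st)
        ((none : Option (List (String × String))), 5)).1

-- ===== PRECONDITION & SPEC =====
def Spec_find_authority_for_issue (issue : Option (List (String × String))) (gov_agencies : List (List (String × String))) (out : Option (List (String × String))) : Prop := out = find_authority_for_issue_alt issue gov_agencies
instance (issue : Option (List (String × String))) (gov_agencies : List (List (String × String))) (out : Option (List (String × String))) : Decidable (Spec_find_authority_for_issue issue gov_agencies out) := by unfold Spec_find_authority_for_issue; infer_instance

-- ===== CLAIM (what is proved, stated in full; the proofs are below) =====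
def Claim_equal_find_authority_for_issue : Prop := ∀ (issue : Option (List (String × String))) (gov_agencies : List (List (String × String))), Dom_find_authority_for_issue issue gov_agencies → Spec_find_authority_for_issue issue gov_agencies (find_authority_for_issue issue gov_agencies)

-- ===== LEMMAS AND PROOFS =====

-- the or-chain of the first n priority classes (priority 0 outermost), fallback b
def chain (t tg : String) : Nat → List (List (String × String)) → Option (List (String × String)) → Option (List (String × String))
  | 0, _, b => b
  | n+1, xs, b => chain t tg n xs ((xs.find? (fun ag => rankOf t tg ag == n)).or b)

theorem chain_nil (t tg : String) (n : Nat) (b : Option (List (String × String))) :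
    chain t tg n [] b = b := by
  induction n generalizing b with
  | zero => rfl
  | succ n ih => simp [chain, ih]

-- an element matching none of the first n classes can be dropped from every class scan
theorem chain_skip (t tg : String) (n : Nat) (x : List (String × String))
    (l : List (List (String × String))) (b : Option (List (String × String)))
    (h : n ≤ rankOf t tg x) :
    chain t tg n (x :: l) b = chain t tg n l b := by
  induction n generalizing b with
  | zero => rfl
  | succ n ih =>
    have hx : (rankOf t tg x == n) = false := by
      simp only [beq_eq_false_iff_ne]; omega
    simp only [chain, List.find?_cons, hx]
    exact ih _ (by omega)

-- an element of rank r < br resolves class r, absorbing all lower-priority classes and the fallback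
theorem chain_absorb (t tg : String) (br : Nat) (x : List (String × String))
    (l : List (List (String × String))) (b : Option (List (String × String)))
    (h : rankOf t tg x < br) :
    chain t tg br (x :: l) b = chain t tg (rankOf t tg x) l (some x) := by
  induction br generalizing b with
  | zero => omega
  | succ n ih =>
    by_cases hr : rankOf t tg x = n
    · have hx : (rankOf t tg x == n) = true := by simp [hr]
      simp only [chain, List.find?_cons, hx, Option.some_or]
      rw [chain_skip t tg n x l (some x) (by omega), hr]
    · have hx : (rankOf t tg x == n) = false := by simp [hr]
      simp only [chain, List.find?_cons, hx]
      exact ih _ (by omega)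

-- B's loop computes the chain of all classes below the starting threshold
theorem fold_eq_chain (t tg : String) (l : List (List (String × String)))
    (b : Option (List (String × String))) (br : Nat) :
    (l.foldl (fun st ag => if rankOf t tg ag < st.2 then (some ag, rankOf t tg ag) else st)
        (b, br)).1 = chain t tg br l b := by
  induction l generalizing b br with
  | nil => simp [chain_nil]
  | cons x l ih =>
    simp only [List.foldl_cons]
    by_cases h : rankOf t tg x < br
    · simp only [h, if_pos]
      rw [ih, chain_absorb t tg br x l b h]
    · simp only [h, if_neg, not_false_iff]
      rw [ih, chain_skip t tg br x l b (by omega)]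

theorem find?_congr_mem {α : Type} (p q : α → Bool) (l : List α)
    (h : ∀ a ∈ l, p a = q a) : l.find? p = l.find? q := by
  induction l with
  | nil => rfl
  | cons x l ih =>
    simp only [List.find?_cons, h x (List.mem_cons_self)]
    cases q x
    · exact ih (fun a ha => h a (List.mem_cons_of_mem _ ha))
    · rfl

theorem find?_all_true {α : Type} (p : α → Bool) (l : List α)
    (h : ∀ a ∈ l, p a = true) : l.find? p = l.head? := by
  cases l with
  | nil => rfl
  | cons x l => simp [h x (List.mem_cons_self)]

-- the rank classes versus A's predicates
theorem rk0_eq (t tg : String) (a : List (String × String)) :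
    (rankOf t tg a == 0) = pExact t a := by
  unfold rankOf pExact; split_ifs <;> simp_all
theorem rk1_eq (t tg : String) (a : List (String × String)) (h : pExact t a = false) :
    (rankOf t tg a == 1) = pLoose t tg a := by
  unfold rankOf pLoose; unfold pExact at h; split_ifs <;> simp_all
theorem rk2_eq (t tg : String) (a : List (String × String)) (h0 : pExact t a = false)
    (_h1 : pLoose t tg a = false) : (rankOf t tg a == 2) = pTag tg a := by
  unfold rankOf pTag; unfold pExact at h0; unfold pLoose at _h1; split_ifs <;> simp_all
theorem rk3_eq (t tg : String) (a : List (String × String)) (h0 : pExact t a = false)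
    (_h1 : pLoose t tg a = false) (h2 : pTag tg a = false) :
    (rankOf t tg a == 3) = pOther a := by
  unfold rankOf pOther; unfold pExact at h0; unfold pLoose at _h1; unfold pTag at h2
  split_ifs <;> simp_all
theorem rk4_eq (t tg : String) (a : List (String × String)) (h0 : pExact t a = false)
    (_h1 : pLoose t tg a = false) (h2 : pTag tg a = false) (h3 : pOther a = false) :
    (rankOf t tg a == 4) = true := by
  unfold rankOf; unfold pExact at h0; unfold pLoose at _h1; unfold pTag at h2; unfold pOther at h3
  split_ifs <;> simp_all

-- ===== VERDICT (by name: the statement is the Claim_ definition above) =====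
theorem find_authority_for_issue_spec : Claim_equal_find_authority_for_issue := by
  intro issue gas _
  show find_authority_for_issue issue gas = find_authority_for_issue_alt issue gas
  cases issue with
  | none => rfl
  | some d =>
    simp only [find_authority_for_issue, find_authority_for_issue_alt, getOrDefault]
    by_cases hd : d = []
    · simp [hd]
    · by_cases hg : gas = []
      · simp [hg]
      · rw [if_neg (by simp [hd, hg] : ¬(d = [] ∨ gas = [])),
           if_neg (by simp [List.isEmpty_iff, hd, hg] :
             ¬((d.isEmpty || gas.isEmpty) = true))]
        generalize (if ((PySem.Dict.get? (PySem.Dict.mk d) "tag").getD "") = "" then "other"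
          else ((PySem.Dict.get? (PySem.Dict.mk d) "tag").getD "")) = tg
        generalize (if ((PySem.Dict.get? (PySem.Dict.mk d) "area").getD "") = "" then ""
          else ((PySem.Dict.get? (PySem.Dict.mk d) "area").getD "")) = ar
        generalize resolve_zone_authority tg ar = t
        rw [fold_eq_chain]
        have hch : chain t tg 5 gas none =
            (gas.find? (fun a => rankOf t tg a == 0)).or
              ((gas.find? (fun a => rankOf t tg a == 1)).or
                ((gas.find? (fun a => rankOf t tg a == 2)).or
                  ((gas.find? (fun a => rankOf t tg a == 3)).or
                    ((gas.find? (fun a => rankOf t tg a == 4)).or none)))) := rfl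
        rw [hch]
        have g0 := fun (a : List (String × String)) (_ : a ∈ gas) => rk0_eq t tg a
        cases h0 : gas.find? (pExact t) with
        | some a => rw [find?_congr_mem _ _ _ g0, h0]; simp
        | none =>
          have e0 : ∀ a ∈ gas, pExact t a = false := by
            simpa [List.find?_eq_none] using h0
          rw [find?_congr_mem _ _ _ g0, h0, Option.none_or]
          have g1 := fun (a : List (String × String)) (ha : a ∈ gas) => rk1_eq t tg a (e0 a ha)
          cases h1 : gas.find? (pLoose t tg) with
          | some a => rw [find?_congr_mem _ _ _ g1, h1]; simp
          | none =>
            have e1 : ∀ a ∈ gas, pLoose t tg a = false := by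
              simpa [List.find?_eq_none] using h1
            rw [find?_congr_mem _ _ _ g1, h1, Option.none_or]
            have g2 := fun (a : List (String × String)) (ha : a ∈ gas) =>
              rk2_eq t tg a (e0 a ha) (e1 a ha)
            cases h2 : gas.find? (pTag tg) with
            | some a => rw [find?_congr_mem _ _ _ g2, h2]; simp
            | none =>
              have e2 : ∀ a ∈ gas, pTag tg a = false := by
                simpa [List.find?_eq_none] using h2
              rw [find?_congr_mem _ _ _ g2, h2, Option.none_or]
              have g3 := fun (a : List (String × String)) (ha : a ∈ gas) =>
                rk3_eq t tg a (e0 a ha) (e1 a ha) (e2 a ha)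
              cases h3 : gas.find? pOther with
              | some a => rw [find?_congr_mem _ _ _ g3, h3]; simp
              | none =>
                have e3 : ∀ a ∈ gas, pOther a = false := by
                  simpa [List.find?_eq_none] using h3
                rw [find?_congr_mem _ _ _ g3, h3, Option.none_or]
                have g4 := fun (a : List (String × String)) (ha : a ∈ gas) =>
                  rk4_eq t tg a (e0 a ha) (e1 a ha) (e2 a ha) (e3 a ha)
                rw [find?_all_true _ _ g4, Option.or_none]
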